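-- pv_equiv track=rewrite | github.com/elamraniyassine02/AI-DRIVEN-SECURITY | security-solution/scripts/log_analysis.py | cluster_logs
-- ===== SOURCE A (Python) =====
-- def cluster_logs(logs):
--     # Dummy implementation (replace with real clustering if needed)
--     clusters = {}
--     for i, log in enumerate(logs):
--         key = f"cluster_{i % 10}"
--         if key not in clusters:
--             clusters[key] = []
--         clusters[key].append(log)
--     return clusters
-- ===== SOURCE B (Python) =====
-- def cluster_logs(logs):
--     n = min(len(logs), 10)
--     return {f"cluster_{r}": [log for i, log in enumerate(logs) if i % 10 == r]
--             for r in range(n)}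
-- ===== Notes on version B (the rewrite author's own statement) =====
-- stated objective: alternative
-- what changed: Instead of one pass scattering each log into a dict keyed by index mod 10, B iterates over the residues 0..min(len(logs),10)-1 and gathers each bucket directly with a comprehension over enumerate(logs), building the dict bucket-by-bucket.
import Mathlib
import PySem

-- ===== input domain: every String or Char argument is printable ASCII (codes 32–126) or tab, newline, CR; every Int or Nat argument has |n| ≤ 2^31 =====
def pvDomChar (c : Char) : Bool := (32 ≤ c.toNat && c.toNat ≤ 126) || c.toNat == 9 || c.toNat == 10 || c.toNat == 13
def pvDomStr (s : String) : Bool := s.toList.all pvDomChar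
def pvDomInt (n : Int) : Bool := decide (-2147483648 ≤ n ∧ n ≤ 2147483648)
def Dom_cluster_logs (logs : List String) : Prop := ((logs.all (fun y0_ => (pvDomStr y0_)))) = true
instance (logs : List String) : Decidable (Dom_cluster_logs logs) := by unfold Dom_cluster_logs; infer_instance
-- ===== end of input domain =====

-- B groups by residue r = 0..min(len,10)-1, gathering each bucket directly, instead of A's
-- single pass scattering each log into a dict keyed by index mod 10 (alternative decomposition).

-- ===== PORT A =====
def cluster_logs (logs : List String) : List (String × List String) :=
  ((PySem.List.enumerate logs 0).foldl (fun clusters p =>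
      let key := "cluster_" ++ PySem.Int.toStr (PySem.Int.mod p.1 10)
      let clusters := if clusters.contains key then clusters else clusters.insert key ([] : List String)
      -- clusters[key].append(log): re-store the bucket with the log appended (exact for a dict of lists)
      clusters.insert key (clusters.getD key [] ++ [p.2]))
    PySem.Dict.empty).items

-- ===== PORT B =====
def cluster_logs_alt (logs : List String) : List (String × List String) :=
  (PySem.List.pyRange 0 (min (logs.length : Int) 10) 1).map (fun r =>
    ("cluster_" ++ PySem.Int.toStr r,
     (PySem.List.enumerate logs 0).filterMap (fun p =>
       if PySem.Int.mod p.1 10 = r then some p.2 else none)))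

-- ===== PRECONDITION & SPEC =====
def Spec_cluster_logs (logs : List String) (out : List (String × List String)) : Prop := out = cluster_logs_alt logs
instance (logs : List String) (out : List (String × List String)) : Decidable (Spec_cluster_logs logs out) := by unfold Spec_cluster_logs; infer_instance

-- ===== CLAIM (what is proved, stated in full; the proofs are below) =====
def Claim_equal_cluster_logs : Prop := ∀ (logs : List String), Dom_cluster_logs logs → Spec_cluster_logs logs (cluster_logs logs)

-- ===== LEMMAS AND PROOFS =====

def pvKey (r : Int) : String := "cluster_" ++ PySem.Int.toStr r

theorem pvKey_inj {a b : Int} (ha0 : 0 ≤ a) (ha : a < 10) (hb0 : 0 ≤ b) (hb : b < 10) :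
    pvKey a = pvKey b ↔ a = b := by
  constructor
  · intro h
    interval_cases a <;> interval_cases b <;> first | rfl | (exfalso; revert h; decide)
  · rintro rfl; rfl

theorem mod10_eq (a : Int) : PySem.Int.mod a 10 = a % 10 :=
  PySem.Int.mod_eq_emod_of_pos (by norm_num)

theorem mod10_bounds (i : Int) : 0 ≤ i % 10 ∧ i % 10 < 10 :=
  ⟨Int.emod_nonneg i (by norm_num), Int.emod_lt_of_pos i (by norm_num)⟩

theorem step_eq (d : PySem.Dict String (List String)) (k x : String) :
    ((if d.contains k then d else d.insert k ([] : List String)).insert k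
      ((if d.contains k then d else d.insert k ([] : List String)).getD k [] ++ [x]))
    = d.modify k [] (· ++ [x]) := by
  simp only [PySem.Dict.modify]
  by_cases h : d.contains k
  · simp [h]
  · have h' : d.contains k = false := by simpa using h
    simp [h', PySem.Dict.insert_insert_self, PySem.Dict.getD_insert_self,
      PySem.Dict.getD_of_not_contains]

theorem step_fun_eq :
    (fun (d : PySem.Dict String (List String)) (p : Int × String) =>
      let key := "cluster_" ++ PySem.Int.toStr (PySem.Int.mod p.1 10)
      let d' := if d.contains key then d else d.insert key ([] : List String)
      d'.insert key (d'.getD key [] ++ [p.2]))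
    = (fun (d : PySem.Dict String (List String)) (p : Int × String) =>
        d.modify (pvKey (PySem.Int.mod p.1 10)) [] (· ++ [p.2])) := by
  funext d p
  exact step_eq d _ p.2

theorem set_range_lemma (n : ℕ) :
    PySem.Set.ofList ((PySem.List.pyRange 0 (n : Int) 1).map (fun i => pvKey (i % 10)))
      = (PySem.List.pyRange 0 (min (n : Int) 10) 1).map pvKey := by
  induction n with
  | zero => simp [PySem.List.pyRange_one_eq_nil]
  | succ n ih =>
    have hsplit : PySem.List.pyRange 0 ((n + 1 : ℕ) : Int) 1
        = PySem.List.pyRange 0 (n : Int) 1 ++ [(n : Int)] := by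
      push_cast
      exact PySem.List.pyRange_one_succ_right (by positivity)
    rw [hsplit, List.map_append, List.map_singleton, PySem.Set.ofList_append_singleton, ih]
    by_cases hn : n < 10
    · have hmod : (n : Int) % 10 = (n : Int) :=
        Int.emod_eq_of_lt (by positivity) (by exact_mod_cast hn)
      have hmin : min ((n : Int)) 10 = (n : Int) := by omega
      have hnotmem : pvKey ((n : Int)) ∉ (PySem.List.pyRange 0 (min ((n : Int)) 10) 1).map pvKey := by
        rw [hmin]
        intro hmem
        obtain ⟨r, hr, heq⟩ := List.mem_map.mp hmem
        rw [PySem.List.mem_pyRange_one] at hr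
        have := (pvKey_inj hr.1 (by omega) (by positivity) (by exact_mod_cast hn)).mp heq
        omega
      have hmin' : min (((n + 1 : ℕ)) : Int) 10 = (n : Int) + 1 := by push_cast; omega
      rw [hmod, PySem.Set.add_of_not_mem hnotmem, hmin, hmin',
        PySem.List.pyRange_one_succ_right (by positivity), List.map_append, List.map_singleton]
    · have hmin : min ((n : Int)) 10 = 10 := by omega
      have hmin' : min (((n + 1 : ℕ)) : Int) 10 = 10 := by push_cast; omega
      have hb := mod10_bounds (n : Int)
      have hmem : pvKey ((n : Int) % 10)
          ∈ (PySem.List.pyRange 0 (min ((n : Int)) 10) 1).map pvKey := by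
        rw [hmin]
        exact List.mem_map.mpr ⟨_, PySem.List.mem_pyRange_one.mpr ⟨hb.1, hb.2⟩, rfl⟩
      rw [PySem.Set.add_of_mem hmem, hmin, hmin']

theorem filter_bucket (l : List (Int × String)) (r : Int) (hr0 : 0 ≤ r) (hr : r < 10) :
    ((l.map (fun p => (pvKey (p.1 % 10), p.2))).filter (fun q => q.1 == pvKey r)).map (·.2)
      = l.filterMap (fun p => if p.1 % 10 = r then some p.2 else none) := by
  induction l with
  | nil => rfl
  | cons p l ih =>
    have hb := mod10_bounds p.1
    have hkey : (pvKey (p.1 % 10) == pvKey r) = decide (p.1 % 10 = r) := by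
      by_cases h : p.1 % 10 = r
      · simp [h]
      · simp only [h, decide_false, beq_eq_false_iff_ne, ne_eq]
        intro hc
        exact h ((pvKey_inj hb.1 hb.2 hr0 hr).mp hc)
    simp only [List.map_cons, List.filter_cons, List.filterMap_cons, hkey]
    by_cases h : p.1 % 10 = r <;> simp [h, ih]

theorem main_eq (logs : List String) : cluster_logs logs = cluster_logs_alt logs := by
  have h1 : cluster_logs logs
      = (((PySem.List.enumerate logs 0).map (fun p => (pvKey (p.1 % 10), p.2))).foldl
          (fun d q => d.modify q.1 [] (· ++ [q.2])) PySem.Dict.empty).items := by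
    unfold cluster_logs
    rw [step_fun_eq, List.foldl_map]
    simp only [mod10_eq]
  set P := (PySem.List.enumerate logs 0).map (fun p => (pvKey (p.1 % 10), p.2)) with hP
  set dA := P.foldl (fun d q => d.modify q.1 [] (· ++ [q.2])) PySem.Dict.empty with hdA
  have hnd : dA.keys.Nodup := by
    rw [hdA]
    exact PySem.Dict.nodup_keys_foldl_modify_key P Prod.fst [] (fun d q => (· ++ [q.2]))
      PySem.Dict.empty (by simp [PySem.Dict.keys_empty])
  have hkeys : dA.keys = (PySem.List.pyRange 0 (min (logs.length : Int) 10) 1).map pvKey := by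
    rw [hdA]
    rw [PySem.Dict.keys_foldl_modify_key P Prod.fst [] (fun d q => (· ++ [q.2])) PySem.Dict.empty]
    rw [PySem.Dict.keys_empty, PySem.Set.update_nil_left, hP]
    rw [List.map_map]
    have h2 : (PySem.List.enumerate logs 0).map
        (Prod.fst ∘ fun p : Int × String => (pvKey (p.1 % 10), p.2))
        = ((PySem.List.enumerate logs 0).map (·.1)).map (fun i => pvKey (i % 10)) := by
      rw [List.map_map]; rfl
    rw [h2, PySem.List.map_fst_enumerate]
    simpa using set_range_lemma logs.length
  have hget : ∀ c, dA.getD c [] = (P.filter (fun q => q.1 == c)).map (·.2) := by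
    intro c
    rw [hdA, PySem.Dict.getD_foldl_modify_append]
    simp [PySem.Dict.getD_empty]
  have hitems : dA.items = dA.keys.map (fun k => (k, dA.getD k [])) :=
    PySem.Dict.items_eq_map_keys dA hnd []
  rw [h1, hitems, hkeys, List.map_map]
  unfold cluster_logs_alt
  simp only [mod10_eq]
  apply List.map_congr_left
  intro r hr
  rw [PySem.List.mem_pyRange_one] at hr
  have hr10 : r < 10 := lt_of_lt_of_le hr.2 (min_le_right _ _)
  simp only [Function.comp]
  rw [hget, hP, filter_bucket _ r hr.1 hr10]
  rfl

-- ===== VERDICT (by name: the statement is the Claim_ definition above) =====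
theorem cluster_logs_spec : Claim_equal_cluster_logs := by
  intro logs _
  unfold Spec_cluster_logs
  exact main_eq logs
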